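-- pv_equiv track=rewrite | github.com/ftCLI/FoundryTools-CLI | ftCLI/Lib/utils/misc.py | int_list_to_num
-- ===== SOURCE A (Python) =====
-- def int_list_to_num(intList, start, length):
--     all_integers = []
--     binary = ""
--     for i in range(start, start + length):
--         if i in intList:
--             b = "1"
--         else:
--             b = "0"
--         binary = b + binary
--         if not (i + 1) % 8:
--             all_integers.append(binary)
--             binary = ""
--     if binary:
--         all_integers.append(binary)
--     all_integers.reverse()
--     all_integers = " ".join(all_integers)
--     return binary2num(all_integers)
--
-- def binary2num(binary):
--     binary = strjoin(binary.split())
--     num = 0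
--     for digit in binary:
--         num = num << 1
--         if digit != "0":
--             num = num | 0x1
--     return num
--
-- def strjoin(iterable, joiner=""):
--     return tostr(joiner).join(iterable)
--
-- def tostr(s, encoding="ascii", errors="strict"):
--     if not isinstance(s, str):
--         return s.decode(encoding, errors)
--     else:
--         return s
-- ===== SOURCE B (Python) =====
-- def int_list_to_num(intList, start, length):
--     # Direct bitmask: bit (i - start) is set iff i is in intList.
--     return sum(1 << (i - start) for i in range(start, start + length) if i in intList)
-- ===== Notes on version B (the rewrite author's own statement) =====
-- stated objective: simpler
-- what changed: Replaced A's pipeline (build binary strings most-significant-first, flush 8-bit chunks on absolute (i+1)%8 boundaries, reverse, space-join, then re-parse the digit string with binary2num) by a one-line bitmask sum: add 1 << (i - start) for each i in range that is in intList.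
import Mathlib
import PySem

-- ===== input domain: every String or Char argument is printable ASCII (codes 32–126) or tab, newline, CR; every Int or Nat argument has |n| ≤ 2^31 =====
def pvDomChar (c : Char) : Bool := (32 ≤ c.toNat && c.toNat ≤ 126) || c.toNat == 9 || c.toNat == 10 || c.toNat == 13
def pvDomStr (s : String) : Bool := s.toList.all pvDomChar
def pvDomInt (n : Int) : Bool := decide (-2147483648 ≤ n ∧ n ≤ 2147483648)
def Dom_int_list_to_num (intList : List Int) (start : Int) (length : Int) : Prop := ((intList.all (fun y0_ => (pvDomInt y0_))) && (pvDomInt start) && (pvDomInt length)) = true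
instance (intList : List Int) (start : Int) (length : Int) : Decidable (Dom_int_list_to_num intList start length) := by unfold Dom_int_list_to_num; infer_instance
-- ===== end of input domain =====

-- B replaces A's build-chunk-reverse-join-reparse string pipeline by a direct bitmask sum (simpler).

-- ===== PORT A =====
-- Strings are represented as List Char (PySem.Chars is the exact model of Python str here).
-- In binary2num, `num = num << 1` is ported as `num * 2` and `num = num | 0x1` as `num + 1`:
-- exact because num is ≥ 0 throughout the fold and even right after the shift.
def pvDigitStep (num : Int) (digit : Char) : Int :=
  let num := num * 2
  if digit != '0' then num + 1 else num

def binary2num (binary : List Char) : Int :=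
  -- binary = strjoin(binary.split())  (tostr on a str is the identity)
  let binary := PySem.Chars.join [] (PySem.Chars.split₀ binary)
  binary.foldl pvDigitStep 0

-- loop body of A: b = "1"/"0"; binary = b + binary (prepend one char); flush chunk when (i+1)%8 == 0
def pvChunkStep (intList : List Int) (st : List (List Char) × List Char) (i : Int) :
    List (List Char) × List Char :=
  let b : Char := if intList.contains i then '1' else '0'
  let binary := b :: st.2
  if PySem.Int.mod (i + 1) 8 == 0 then (st.1 ++ [binary], []) else (st.1, binary)

def int_list_to_num (intList : List Int) (start : Int) (length : Int) : Int :=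
  let st := (PySem.List.pyRange start (start + length) 1).foldl (pvChunkStep intList) ([], [])
  let all_integers := if st.2.isEmpty then st.1 else st.1 ++ [st.2]
  binary2num (PySem.Chars.join [' '] all_integers.reverse)

-- ===== PORT B =====
-- `1 << (i - start)` is ported as `2 ^ (i - start).toNat`: exact since i ≥ start inside the range.
def int_list_to_num_alt (intList : List Int) (start : Int) (length : Int) : Int :=
  (((PySem.List.pyRange start (start + length) 1).filter
      (fun i => intList.contains i)).map
      (fun i => (2 : Int) ^ (i - start).toNat)).sum

-- ===== PRECONDITION & SPEC =====
def Spec_int_list_to_num (intList : List Int) (start : Int) (length : Int) (out : Int) : Prop := out = int_list_to_num_alt intList start length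
instance (intList : List Int) (start : Int) (length : Int) (out : Int) : Decidable (Spec_int_list_to_num intList start length out) := by unfold Spec_int_list_to_num; infer_instance

-- ===== CLAIM (what is proved, stated in full; the proofs are below) =====
def Claim_equal_int_list_to_num : Prop := ∀ (intList : List Int) (start : Int) (length : Int), Dom_int_list_to_num intList start length → Spec_int_list_to_num intList start length (int_list_to_num intList start length)

-- ===== LEMMAS AND PROOFS =====

-- the bit character of index i
def pvBit (intList : List Int) (i : Int) : Char :=
  if intList.contains i then '1' else '0'

-- the digit string (most significant first) for indices start .. start+n-1
def pvBits (intList : List Int) (s : Int) : Nat → List Char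
  | 0 => []
  | n + 1 => pvBit intList (s + n) :: pvBits intList s n

lemma pvBits_length (intList : List Int) (s : Int) (n : Nat) :
    (pvBits intList s n).length = n := by
  induction n with
  | zero => rfl
  | succ n ih => simp [pvBits, ih]

lemma pvGo_nil (cur : List Char) (acc : List (List Char)) :
    PySem.Chars.split₀.go [] cur acc
      = if cur.isEmpty then acc.reverse else (cur.reverse :: acc).reverse := by
  rw [PySem.Chars.split₀.go]

lemma pvGo_nonspace (c : Char) (rest cur : List Char) (acc : List (List Char))
    (hc : PySem.Chars.isspace c = false) :
    PySem.Chars.split₀.go (c :: rest) cur acc = PySem.Chars.split₀.go rest (c :: cur) acc := by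
  rw [PySem.Chars.split₀.go]; simp [hc]

lemma pvGo_space (c : Char) (rest cur : List Char) (acc : List (List Char))
    (hc : PySem.Chars.isspace c = true) (hcur : cur ≠ []) :
    PySem.Chars.split₀.go (c :: rest) cur acc
      = PySem.Chars.split₀.go rest [] (cur.reverse :: acc) := by
  rw [PySem.Chars.split₀.go]; simp [hc, hcur]

-- go over a whitespace-free word consumes it into cur
lemma pvGo_word (w : List Char) (hw : ∀ c ∈ w, PySem.Chars.isspace c = false)
    (rest cur : List Char) (acc : List (List Char)) :
    PySem.Chars.split₀.go (w ++ rest) cur acc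
      = PySem.Chars.split₀.go rest (w.reverse ++ cur) acc := by
  induction w generalizing cur with
  | nil => simp
  | cons c w ih =>
    have hc : PySem.Chars.isspace c = false := hw c (by simp)
    rw [List.cons_append, pvGo_nonspace c (w ++ rest) cur acc hc,
      ih (fun d hd => hw d (by simp [hd])) (c :: cur)]
    simp

-- split₀ undoes the space-join of nonempty whitespace-free chunks
lemma pvGo_join (chunks : List (List Char))
    (hne : ∀ w ∈ chunks, w ≠ [])
    (hns : ∀ w ∈ chunks, ∀ c ∈ w, PySem.Chars.isspace c = false)
    (acc : List (List Char)) :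
    PySem.Chars.split₀.go (PySem.Chars.join [' '] chunks) [] acc
      = acc.reverse ++ chunks := by
  induction chunks generalizing acc with
  | nil =>
    simp [PySem.Chars.join, List.intercalate, pvGo_nil]
  | cons w chunks ih =>
    have hwne : w ≠ [] := hne w (by simp)
    have hwns : ∀ c ∈ w, PySem.Chars.isspace c = false := hns w (by simp)
    cases chunks with
    | nil =>
      have hj : PySem.Chars.join [' '] [w] = w := by
        simp [PySem.Chars.join, List.intercalate]
      rw [hj, show w = w ++ [] from (List.append_nil w).symm,
        pvGo_word w hwns [] [] acc, pvGo_nil]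
      simp [hwne]
    | cons v chs =>
      have hj : PySem.Chars.join [' '] (w :: v :: chs)
          = w ++ (' ' :: PySem.Chars.join [' '] (v :: chs)) := by
        rw [PySem.Chars.join_cons_cons]; simp
      rw [hj, pvGo_word w hwns _ [] acc,
        pvGo_space ' ' _ _ acc (by decide) (by simp [hwne]),
        ih (fun u hu => hne u (by simp [hu])) (fun u hu => hns u (by simp [hu]))]
      simp

lemma pvSplit_join (chunks : List (List Char))
    (hne : ∀ w ∈ chunks, w ≠ [])
    (hns : ∀ w ∈ chunks, ∀ c ∈ w, PySem.Chars.isspace c = false) :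
    PySem.Chars.split₀ (PySem.Chars.join [' '] chunks) = chunks := by
  simpa [PySem.Chars.split₀] using pvGo_join chunks hne hns []

lemma pvJoin_nil_flatten (xs : List (List Char)) :
    PySem.Chars.join [] xs = xs.flatten := by
  simp [PySem.Chars.join, List.intercalate]
  induction xs with
  | nil => simp
  | cons x xs ih => cases xs <;> simp_all [List.intersperse]

-- value shift lemma for binary2num's fold
lemma pvVal_shift (l : List Char) (a : Int) :
    l.foldl pvDigitStep a = a * 2 ^ l.length + l.foldl pvDigitStep 0 := by
  induction l generalizing a with
  | nil => simp
  | cons c l ih =>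
    rw [List.foldl_cons, List.foldl_cons, ih (pvDigitStep a c), ih (pvDigitStep 0 c)]
    unfold pvDigitStep
    split_ifs <;> simp [List.length_cons] <;> ring

-- digits that are '0' or '1' are never whitespace
lemma pvBitChar_nonspace (c : Char) (hc : c = '1' ∨ c = '0') :
    PySem.Chars.isspace c = false := by
  rcases hc with rfl | rfl <;> decide

-- loop invariant of A's chunk fold
lemma pvLoopA (intList : List Int) (s : Int) (n : Nat) :
    (((PySem.List.pyRange s (s + n) 1).foldl (pvChunkStep intList) ([], [])).2
        ++ ((PySem.List.pyRange s (s + n) 1).foldl (pvChunkStep intList) ([], [])).1.reverse.flatten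
      = pvBits intList s n)
    ∧ (∀ w ∈ ((PySem.List.pyRange s (s + n) 1).foldl (pvChunkStep intList) ([], [])).1, w ≠ [])
    ∧ (∀ c ∈ ((PySem.List.pyRange s (s + n) 1).foldl (pvChunkStep intList) ([], [])).2, c = '1' ∨ c = '0')
    ∧ (∀ w ∈ ((PySem.List.pyRange s (s + n) 1).foldl (pvChunkStep intList) ([], [])).1,
        ∀ c ∈ w, c = '1' ∨ c = '0') := by
  induction n with
  | zero =>
    rw [show s + (0 : Nat) = s by simp, PySem.List.pyRange_one_eq_nil (le_refl s)]
    simp [pvBits]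
  | succ n ih =>
    have hsplit : PySem.List.pyRange s (s + (n + 1 : Nat)) 1
        = PySem.List.pyRange s (s + n) 1 ++ [s + n] := by
      rw [show s + ((n : Nat) + 1 : Nat) = (s + n) + 1 by push_cast; ring]
      exact PySem.List.pyRange_one_succ_right (by omega)
    obtain ⟨h1, h2, h3, h4⟩ := ih
    rw [hsplit, List.foldl_append]
    set st := (PySem.List.pyRange s (s + n) 1).foldl (pvChunkStep intList) ([], []) with hst
    simp only [List.foldl_cons, List.foldl_nil]
    unfold pvChunkStep
    by_cases hm : PySem.Int.mod (s + n + 1) 8 == 0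
    · rw [if_pos hm]
      refine ⟨?_, ?_, by simp, ?_⟩
      · simp [pvBits, pvBit, ← h1]
      · intro w hw
        rcases List.mem_append.1 hw with hw | hw
        · exact h2 w hw
        · simp at hw; subst hw; simp
      · intro w hw
        rcases List.mem_append.1 hw with hw | hw
        · exact h4 w hw
        · simp at hw; subst hw
          intro c hc
          rcases List.mem_cons.1 hc with rfl | hc
          · split_ifs <;> simp
          · exact h3 c hc
    · rw [if_neg hm]
      refine ⟨?_, h2, ?_, h4⟩
      · simp [pvBits, pvBit, ← h1]
      · intro c hc
        rcases List.mem_cons.1 hc with rfl | hc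
        · split_ifs <;> simp
        · exact h3 c hc

lemma pvA_eq_val (intList : List Int) (s : Int) (n : Nat) :
    int_list_to_num intList s n = (pvBits intList s n).foldl pvDigitStep 0 := by
  obtain ⟨h1, h2, h3, h4⟩ := pvLoopA intList s n
  simp only [int_list_to_num, binary2num]
  set st := (PySem.List.pyRange s (s + n) 1).foldl (pvChunkStep intList) ([], []) with hst
  set all := if st.2.isEmpty then st.1 else st.1 ++ [st.2] with hall
  have hane : ∀ w ∈ all.reverse, w ≠ [] := by
    intro w hw
    rw [List.mem_reverse] at hw
    rw [hall] at hw
    split_ifs at hw with he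
    · exact h2 w hw
    · rcases List.mem_append.1 hw with hw | hw
      · exact h2 w hw
      · simp at hw; subst hw; simpa using he
  have hans : ∀ w ∈ all.reverse, ∀ c ∈ w, PySem.Chars.isspace c = false := by
    intro w hw c hc
    rw [List.mem_reverse] at hw
    rw [hall] at hw
    apply pvBitChar_nonspace
    split_ifs at hw with he
    · exact h4 w hw c hc
    · rcases List.mem_append.1 hw with hw | hw
      · exact h4 w hw c hc
      · simp at hw; subst hw; exact h3 c hc
  rw [pvSplit_join all.reverse hane hans, pvJoin_nil_flatten]
  have hflat : all.reverse.flatten = pvBits intList s n := by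
    rw [← h1, hall]
    by_cases he : st.2.isEmpty
    · have h0 : st.2 = [] := by simpa [List.isEmpty_iff] using he
      simp [h0]
    · simp [he, List.reverse_append]
  rw [hflat]

lemma pvB_eq_val (intList : List Int) (s : Int) (n : Nat) :
    int_list_to_num_alt intList s n = (pvBits intList s n).foldl pvDigitStep 0 := by
  induction n with
  | zero =>
    unfold int_list_to_num_alt
    rw [show s + (0 : Nat) = s by simp, PySem.List.pyRange_one_eq_nil (le_refl s)]
    simp [pvBits]
  | succ n ih =>
    have hsplit : PySem.List.pyRange s (s + (n + 1 : Nat)) 1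
        = PySem.List.pyRange s (s + n) 1 ++ [s + n] := by
      rw [show s + ((n : Nat) + 1 : Nat) = (s + n) + 1 by push_cast; ring]
      exact PySem.List.pyRange_one_succ_right (by omega)
    unfold int_list_to_num_alt at ih ⊢
    rw [hsplit, List.filter_append, List.map_append, List.sum_append, ih,
      pvBits, List.foldl_cons, pvVal_shift _ (pvDigitStep 0 (pvBit intList (s + n))),
      pvBits_length]
    have hb : pvDigitStep 0 (pvBit intList (s + n)) = if (s + n) ∈ intList then 1 else 0 := by
      by_cases hmem : (s + n) ∈ intList <;> simp [pvDigitStep, pvBit, hmem]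
    rw [hb]
    by_cases hmem : (s + n) ∈ intList
    · simp [hmem]; ring
    · simp [hmem]

-- ===== VERDICT (by name: the statement is the Claim_ definition above) =====
theorem int_list_to_num_spec : Claim_equal_int_list_to_num := by
  intro intList start length _
  unfold Spec_int_list_to_num
  by_cases hl : 0 ≤ length
  · have : length = (length.toNat : Int) := by omega
    rw [this, pvA_eq_val, pvB_eq_val]
  · have hnil : PySem.List.pyRange start (start + length) 1 = [] :=
      PySem.List.pyRange_one_eq_nil (by omega)
    unfold int_list_to_num int_list_to_num_alt binary2num
    rw [hnil]
    simp [PySem.Chars.join, List.intercalate, PySem.Chars.split₀, pvGo_nil]
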